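-- pv_equiv track=rewrite | github.com/winstoncheong/arxiv-fixes | hep-th_9408074v2/convert.py | count_imbalances
-- ===== SOURCE A (Python) =====
-- def count_imbalances(line: str) -> int:
--     """
--     Count number of starting braces without ending braces
--     """
--     count = 0
--     for char in line:
--         if char == "{":
--             count += 1
--         elif char == "}":
--             count -= 1
--     return count
-- ===== SOURCE B (Python) =====
-- def count_imbalances(line: str) -> int:
--     """
--     Count number of starting braces without ending braces
--     """
--     # Splitting on a separator yields one more piece than there are separators,
--     # so the two +1s cancel and the difference is the net brace count.
--     return len(line.split("{")) - len(line.split("}"))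
-- ===== Notes on version B (the rewrite author's own statement) =====
-- stated objective: alternative
-- what changed: Instead of scanning characters with a running accumulator, B splits the string on each brace kind and derives the net count from the number of pieces (splitting on a separator gives one piece more than occurrences, and the two +1s cancel).
import Mathlib
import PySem

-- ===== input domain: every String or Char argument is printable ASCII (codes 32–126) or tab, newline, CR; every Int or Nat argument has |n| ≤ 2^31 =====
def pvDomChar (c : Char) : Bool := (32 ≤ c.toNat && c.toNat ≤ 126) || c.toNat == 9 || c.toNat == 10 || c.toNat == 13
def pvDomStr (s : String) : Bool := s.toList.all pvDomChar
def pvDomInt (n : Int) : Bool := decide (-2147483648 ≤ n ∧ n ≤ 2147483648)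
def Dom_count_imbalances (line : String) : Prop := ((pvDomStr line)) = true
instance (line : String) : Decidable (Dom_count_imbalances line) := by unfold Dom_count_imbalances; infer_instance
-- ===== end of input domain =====

-- B derives the net brace count by splitting the string on each brace kind and comparing the
-- number of pieces, instead of A's per-character accumulating loop (objective: alternative).

-- ===== PORT A =====
-- literal port of A's loop: fold over the characters with a running count
def count_imbalances (line : String) : Int :=
  line.toList.foldl
    (fun count char =>
      if char == '{' then count + 1
      else if char == '}' then count - 1
      else count)
    0

-- ===== PORT B =====
-- literal port of B: len(line.split("{")) - len(line.split("}"))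
-- (split? returns none only for an empty separator; both separators here are the
-- nonempty literals "{" and "}", so getD's default is never taken)
def count_imbalances_alt (line : String) : Int :=
  (((PySem.Str.split? line "{").getD []).length : Int)
    - (((PySem.Str.split? line "}").getD []).length : Int)

-- ===== PRECONDITION & SPEC =====
def Spec_count_imbalances (line : String) (out : Int) : Prop := out = count_imbalances_alt line
instance (line : String) (out : Int) : Decidable (Spec_count_imbalances line out) := by unfold Spec_count_imbalances; infer_instance

-- ===== CLAIM (what is proved, stated in full; the proofs are below) =====
def Claim_equal_count_imbalances : Prop := ∀ (line : String), Dom_count_imbalances line → Spec_count_imbalances line (count_imbalances line)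

-- ===== LEMMAS AND PROOFS =====

-- splitting on a single-character separator yields acc.length + 1 + (count of that char) pieces
theorem pv_splitOn_go_single (c : Char) (s : List Char) : ∀ (fuel : Nat) (cur : List Char) (acc : List (List Char)),
    s.length < fuel →
    (PySem.Chars.splitOn.go [c] fuel s cur acc).length = acc.length + 1 + s.count c := by
  induction s with
  | nil =>
    intro fuel cur acc h
    cases fuel with
    | zero => omega
    | succ n => simp [PySem.Chars.splitOn.go]
  | cons h t ih =>
    intro fuel cur acc hf
    cases fuel with
    | zero => simp at hf
    | succ n =>
      have ht : t.length < n := by simpa using hf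
      simp only [PySem.Chars.splitOn.go]
      by_cases hc : h = c
      · subst hc
        simp [List.isPrefixOf, ih n [] (cur.reverse :: acc) ht]
        omega
      · have hpf : List.isPrefixOf [c] (h :: t) = false := by
          simp [List.isPrefixOf]; exact fun h' => hc h'.symm
        rw [hpf]
        simp [ih n (h :: cur) acc ht, hc]

-- number of pieces of splitOn with a one-character separator
theorem pv_splitOn_single_length (c : Char) (s : List Char) :
    (PySem.Chars.splitOn s [c]).length = 1 + s.count c := by
  simp [PySem.Chars.splitOn, pv_splitOn_go_single c s (s.length + 1) [] [] (by omega)]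

-- A's accumulating loop computes count '{' minus count '}' on any list of chars
theorem pv_foldl_brace (s : List Char) : ∀ (a : Int),
    s.foldl (fun count char =>
      if char == '{' then count + 1
      else if char == '}' then count - 1
      else count) a
      = a + (s.count '{' : Int) - (s.count '}' : Int) := by
  induction s with
  | nil => intro a; simp
  | cons h t ih =>
    intro a
    simp only [List.foldl, List.count_cons, ih]
    by_cases h1 : h = '{'
    · subst h1; simp; ring
    · by_cases h2 : h = '}'
      · subst h2; simp; ring
      · simp [h1, h2]

-- ===== VERDICT (by name: the statement is the Claim_ definition above) =====
theorem count_imbalances_spec : Claim_equal_count_imbalances := by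
  intro line _
  unfold Spec_count_imbalances count_imbalances count_imbalances_alt
  have h1 : ((PySem.Str.split? line "{").getD []).length
      = 1 + line.toList.count '{' := by
    simp [PySem.Str.split?, PySem.Chars.split?, pv_splitOn_single_length,
      show ("{" : String).toList = ['{'] from rfl]
  have h2 : ((PySem.Str.split? line "}").getD []).length
      = 1 + line.toList.count '}' := by
    simp [PySem.Str.split?, PySem.Chars.split?, pv_splitOn_single_length,
      show ("}" : String).toList = ['}'] from rfl]
  rw [h1, h2, pv_foldl_brace]
  push_cast
  ring
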